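-- pv_equiv track=rewrite | github.com/khojiT/CV | extensions/utill.py | persian_numbers_converter
-- ===== SOURCE A (Python) =====
-- def persian_numbers_converter(num , mode ='other'):
--     under_zero = False
--     if num == None:
--         num = 0
--     if mode == 'price':
--         if num<0:
--             under_zero = True
--             num = -1 * num
--     num = str(num)
--     numbers = {
--            "0" : "۰",
--            "1" : "۱",
--            "2" : "۲",
--            "3" : "۳",
--            "4" : "۴",
--            "5" : "۵",
--            "6" : "۶",
--            "7" : "۷",
--            "8" : "۸",
--            "9" : "۹",
--     }
--     persian_num = ""
--     for i in range(len(num)):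
--         if ( num[i] in numbers):
--             persian_num += numbers[num[i]]
--         else:
--             persian_num += num[i]
--     if (mode == 'price'):
--         persian_num = persian_num[::-1]
--         persian_num = ','.join( [ persian_num[i:i+3] for i in range(0,len(persian_num),3) ] )
--         if under_zero:
--             persian_num = ' - ' + persian_num
--         return persian_num[::-1]
--     else:
--         return persian_num
-- ===== SOURCE B (Python) =====
-- PERSIAN = str.maketrans('0123456789', '\u06f0\u06f1\u06f2\u06f3\u06f4\u06f5\u06f6\u06f7\u06f8\u06f9')
--
-- def persian_numbers_converter(num, mode='other'):
--     if num is None: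
--         num = 0
--     if mode != 'price':
--         return str(num).translate(PERSIAN)
--     neg = num < 0
--     s = str(abs(num)).translate(PERSIAN)
--     r = len(s) % 3
--     parts = ([s[:r]] if r else []) + [s[i:i+3] for i in range(r, len(s), 3)]
--     out = ','.join(parts)
--     return out + ' - ' if neg else out
-- ===== Notes on version B (the rewrite author's own statement) =====
-- stated objective: simpler
-- what changed: Digits are converted with a str.translate mapping table instead of a per-character dict loop, and price grouping is done forward with an initial len%3 chunk (appending ' - ' for negatives) instead of double string reversal.
import Mathlib
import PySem

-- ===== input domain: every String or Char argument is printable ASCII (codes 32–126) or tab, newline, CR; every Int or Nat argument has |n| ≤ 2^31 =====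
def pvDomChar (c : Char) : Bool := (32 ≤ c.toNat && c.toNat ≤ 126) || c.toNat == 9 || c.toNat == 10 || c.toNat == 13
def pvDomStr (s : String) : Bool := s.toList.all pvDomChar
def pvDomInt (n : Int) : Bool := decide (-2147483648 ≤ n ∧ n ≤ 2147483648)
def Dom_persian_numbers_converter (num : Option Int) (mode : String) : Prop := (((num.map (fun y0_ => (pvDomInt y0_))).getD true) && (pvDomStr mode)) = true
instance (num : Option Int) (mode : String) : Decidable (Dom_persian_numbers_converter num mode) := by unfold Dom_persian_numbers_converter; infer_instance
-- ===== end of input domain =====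

-- B converts digits via a translation table and groups price digits forward with an initial len%3 chunk
-- (no string reversals); same return value as A, objective: simpler.

-- ===== PORT A =====
-- the 'numbers' dict of A: keys are single-character strings, ported as chars
def pncPairs : List (Char × Char) :=
  [('0','۰'),('1','۱'),('2','۲'),('3','۳'),('4','۴'),
   ('5','۵'),('6','۶'),('7','۷'),('8','۸'),('9','۹')]

def persian_numbers_converter (num : Option Int) (mode : String) : String :=
  -- if num == None: num = 0
  let n0 : Int := match num with | none => 0 | some v => v
  -- under_zero / negation, only in price mode
  let uz : Bool × Int :=
    if mode = "price" then (if n0 < 0 then (true, -1 * n0) else (false, n0)) else (false, n0)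
  -- num = str(num); the character loop building persian_num
  let s : List Char := PySem.Int.toChars uz.2
  let persian : List Char := s.foldl (fun acc c =>
    match pncPairs.lookup c with
    | some d => acc ++ [d]
    | none   => acc ++ [c]) []
  if mode = "price" then
    let p1 := persian.reverse
    let p2 := PySem.Chars.join [','] ((PySem.List.pyRange 0 (p1.length : Int) 3).map
                (fun i => PySem.List.slice p1 (some i) (some (i + 3))))
    let p3 := if uz.1 then [' ', '-', ' '] ++ p2 else p2
    String.ofList p3.reverse
  else
    String.ofList persian

-- ===== PORT B =====
-- the str.maketrans translation table of Source B, as a character function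
def pncTrans (c : Char) : Char :=
  if c = '0' then '۰' else if c = '1' then '۱' else if c = '2' then '۲' else
  if c = '3' then '۳' else if c = '4' then '۴' else if c = '5' then '۵' else
  if c = '6' then '۶' else if c = '7' then '۷' else if c = '8' then '۸' else
  if c = '9' then '۹' else c

def persian_numbers_converter_alt (num : Option Int) (mode : String) : String :=
  let n : Int := num.getD 0
  if mode ≠ "price" then
    String.ofList ((PySem.Int.toChars n).map pncTrans)
  else
    let neg : Bool := n < 0
    let s : List Char := (PySem.Int.toChars |n|).map pncTrans
    let r : Nat := s.length % 3
    let parts : List (List Char) :=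
      (if r = 0 then [] else [s.take r]) ++
      (PySem.List.pyRange (r : Int) (s.length : Int) 3).map
        (fun i => PySem.List.slice s (some i) (some (i + 3)))
    let out := PySem.Chars.join [','] parts
    String.ofList (if neg then out ++ [' ', '-', ' '] else out)

-- ===== PRECONDITION & SPEC =====
def Spec_persian_numbers_converter (num : Option Int) (mode : String) (out : String) : Prop := out = persian_numbers_converter_alt num mode
instance (num : Option Int) (mode : String) (out : String) : Decidable (Spec_persian_numbers_converter num mode out) := by unfold Spec_persian_numbers_converter; infer_instance

-- ===== CLAIM (what is proved, stated in full; the proofs are below) =====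
def Claim_equal_persian_numbers_converter : Prop := ∀ (num : Option Int) (mode : String), Dom_persian_numbers_converter num mode → Spec_persian_numbers_converter num mode (persian_numbers_converter num mode)

-- ===== LEMMAS AND PROOFS =====

-- proof-only helper: chunks of three from the front
def chunk3 {α : Type} : List α → List (List α)
  | [] => []
  | a :: l => (a :: l.take 2) :: chunk3 (l.drop 2)
termination_by l => l.length
decreasing_by simp

theorem chunk3_of_ne_nil {α : Type} (l : List α) (h : l ≠ []) :
    chunk3 l = l.take 3 :: chunk3 (l.drop 3) := by
  cases l with
  | nil => exact absurd rfl h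
  | cons a t => rw [chunk3.eq_def]; simp

theorem chunk3_small {α : Type} (l : List α) (h : l ≠ []) (h3 : l.length ≤ 3) :
    chunk3 l = [l] := by
  rw [chunk3_of_ne_nil l h, List.take_of_length_le h3, List.drop_eq_nil_of_le h3]
  rw [chunk3.eq_def]

theorem chunk3_append {α : Type} (x y : List α) (h : 3 ∣ x.length) :
    chunk3 (x ++ y) = chunk3 x ++ chunk3 y := by
  by_cases hx : x = []
  · subst hx; simp [chunk3]
  · have hlen : 3 ≤ x.length := by
      rcases h with ⟨k, hk⟩
      have : x.length ≠ 0 := by simpa using hx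
      omega
    rw [chunk3_of_ne_nil (x ++ y) (by simp [hx]),
        chunk3_of_ne_nil x hx,
        List.take_append_of_le_length hlen,
        List.drop_append_of_le_length hlen,
        chunk3_append (x.drop 3) y (by simp; omega)]
    simp
termination_by x.length
decreasing_by simp; omega

theorem pyRange3_nil (a b : Int) (h : b ≤ a) : PySem.List.pyRange a b 3 = [] := by
  rw [PySem.List.pyRange_of_pos a b (by norm_num)]
  simp [show ¬ a < b by omega]

theorem pyRange3_cons (a b : Int) (h : a < b) :
    PySem.List.pyRange a b 3 = a :: PySem.List.pyRange (a + 3) b 3 := by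
  rw [PySem.List.pyRange_of_pos a b (by norm_num),
      PySem.List.pyRange_of_pos (a+3) b (by norm_num)]
  by_cases h3 : a + 3 < b
  · rw [if_pos h, if_pos h3]
    have hc : ((b - a + 3 - 1) / 3).toNat = ((b - (a+3) + 3 - 1) / 3).toNat + 1 := by omega
    rw [hc, List.range_succ_eq_map]
    simp [List.map_map, Function.comp]
    intro k _
    ring
  · rw [if_pos h, if_neg h3]
    have hc : ((b - a + 3 - 1) / 3).toNat = 1 := by omega
    rw [hc]
    simp

theorem slices_eq_chunk3 {α : Type} (l : List α) (a : Nat) :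
    (PySem.List.pyRange (a : Int) (l.length : Int) 3).map
      (fun i => PySem.List.slice l (some i) (some (i + 3))) = chunk3 (l.drop a) := by
  by_cases h : a < l.length
  · rw [pyRange3_cons _ _ (by exact_mod_cast h)]
    have h3 : ((a : Int) + 3) = ((a + 3 : Nat) : Int) := by push_cast; ring
    have hs : PySem.List.slice l (some (a : Int)) (some ((a : Int) + 3)) = (l.drop a).take 3 := by
      have := PySem.List.slice_natCast_add l a 3
      simpa using this
    rw [List.map_cons, hs, h3, slices_eq_chunk3 l (a + 3),
        chunk3_of_ne_nil (l.drop a) (by simp; omega)]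
    simp [List.drop_drop]
  · rw [pyRange3_nil _ _ (by exact_mod_cast Nat.le_of_not_lt h)]
    rw [List.drop_eq_nil_of_le (by omega)]
    simp [chunk3]
termination_by l.length - a
decreasing_by omega

theorem join_snoc (sep x : List Char) (M : List (List Char)) (h : M ≠ []) :
    PySem.Chars.join sep (M ++ [x]) = PySem.Chars.join sep M ++ sep ++ x := by
  induction M with
  | nil => exact absurd rfl h
  | cons a t ih =>
    cases t with
    | nil => simp [PySem.Chars.join_cons_cons, PySem.Chars.join_singleton]
    | cons b t' =>
      show PySem.Chars.join sep (a :: b :: (t' ++ [x])) = _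
      rw [PySem.Chars.join_cons_cons, show b :: (t' ++ [x]) = (b :: t') ++ [x] from rfl,
          ih (by simp), PySem.Chars.join_cons_cons]
      simp

theorem rev_join (sep : List Char) (L : List (List Char)) :
    (PySem.Chars.join sep L).reverse
      = PySem.Chars.join sep.reverse ((L.map List.reverse).reverse) := by
  induction L with
  | nil => simp [PySem.Chars.join_nil]
  | cons a t ih =>
    cases t with
    | nil => simp [PySem.Chars.join_singleton]
    | cons b t' =>
      rw [PySem.Chars.join_cons_cons]
      conv_rhs => rw [List.map_cons, List.reverse_cons]
      rw [join_snoc _ _ _ (by simp), ← ih]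
      simp

theorem chunk3_rev {α : Type} (l : List α) :
    ((chunk3 l.reverse).map List.reverse).reverse
      = (if l.length % 3 = 0 then [] else [l.take (l.length % 3)])
        ++ chunk3 (l.drop (l.length % 3)) := by
  by_cases h0 : l = []
  · subst h0; simp [chunk3]
  · by_cases h3 : l.length ≤ 3
    · rw [chunk3_small l.reverse (by simpa using h0) (by simpa using h3)]
      by_cases he : l.length % 3 = 0
      · have : l.length = 3 := by
          have : l.length ≠ 0 := by simpa using h0
          omega
        rw [if_pos he, he]
        simp only [List.drop_zero]
        rw [chunk3_small l h0 h3]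
        simp
      · have hr : l.length % 3 = l.length := by omega
        rw [if_neg he, hr, List.take_length, List.drop_length]
        simp [chunk3]
    · -- l.length > 3 : split off the last three elements
      have hlen : 3 < l.length := by omega
      set f := l.take (l.length - 3) with hf
      set t := l.drop (l.length - 3) with ht
      have hft : l = f ++ t := by simp [hf, ht]
      have htlen : t.length = 3 := by simp [ht]; omega
      have hflen : f.length = l.length - 3 := by simp [hf]
      have hrev : l.reverse = t.reverse ++ f.reverse := by rw [hft]; simp
      have hchunk : chunk3 l.reverse = t.reverse :: chunk3 f.reverse := by
        rw [hrev, chunk3_of_ne_nil _ (by simp; intro h'; simp [h'] at htlen)]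
        congr 1
        · rw [List.take_append_of_le_length (by simp [htlen])]
          exact List.take_of_length_le (by simp [htlen])
        · congr 1
          rw [List.drop_append_of_le_length (by simp [htlen])]
          simp [htlen]
      have hr : l.length % 3 = f.length % 3 := by omega
      have ihf := chunk3_rev f
      rw [hchunk]
      simp only [List.map_cons, List.reverse_cons]
      rw [ihf, ← hr]
      have hrle : l.length % 3 ≤ f.length := by omega
      have htake : l.take (l.length % 3) = f.take (l.length % 3) := by
        rw [hf, List.take_take]
        congr 1
        omega
      have h1 : f.drop (l.length % 3) = (l.drop (l.length % 3)).take (l.length - 3 - l.length % 3) := by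
        rw [hf, List.drop_take]
      have h2 : t = (l.drop (l.length % 3)).drop (l.length - 3 - l.length % 3) := by
        rw [ht, List.drop_drop]
        congr 1
        omega
      have hdrop : l.drop (l.length % 3) = f.drop (l.length % 3) ++ t := by
        rw [h1, h2, List.take_append_drop]
      rw [htake, hdrop, chunk3_append _ _ (by simp [hflen]; omega),
          chunk3_small t (by intro h'; simp [h'] at htlen) (by omega)]
      simp
termination_by l.length
decreasing_by simp [List.length_take]; omega

theorem lookup_step (c : Char) (acc : List Char) :
    (match pncPairs.lookup c with
     | some d => acc ++ [d]
     | none   => acc ++ [c]) = acc ++ [pncTrans c] := by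
  cases h : pncPairs.lookup c with
  | none =>
    simp [pncPairs] at h
    obtain ⟨h0,h1,h2,h3,h4,h5,h6,h7,h8,h9⟩ := h
    simp [pncTrans, h0,h1,h2,h3,h4,h5,h6,h7,h8,h9]
  | some d =>
    simp only [pncPairs, List.lookup] at h
    by_cases h0 : c = '0'
    · rw [show (c == '0') = true by simpa using h0] at h
      simp at h
      subst h
      simp [pncTrans, h0]
    · rw [show (c == '0') = false by simpa using h0] at h
      by_cases h1 : c = '1'
      · rw [show (c == '1') = true by simpa using h1] at h
        simp at h
        subst h
        simp [pncTrans, h1]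
      · rw [show (c == '1') = false by simpa using h1] at h
        by_cases h2 : c = '2'
        · rw [show (c == '2') = true by simpa using h2] at h
          simp at h
          subst h
          simp [pncTrans, h2]
        · rw [show (c == '2') = false by simpa using h2] at h
          by_cases h3 : c = '3'
          · rw [show (c == '3') = true by simpa using h3] at h
            simp at h
            subst h
            simp [pncTrans, h3]
          · rw [show (c == '3') = false by simpa using h3] at h
            by_cases h4 : c = '4'
            · rw [show (c == '4') = true by simpa using h4] at h
              simp at h
              subst h
              simp [pncTrans, h4]
            · rw [show (c == '4') = false by simpa using h4] at h
              by_cases h5 : c = '5'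
              · rw [show (c == '5') = true by simpa using h5] at h
                simp at h
                subst h
                simp [pncTrans, h5]
              · rw [show (c == '5') = false by simpa using h5] at h
                by_cases h6 : c = '6'
                · rw [show (c == '6') = true by simpa using h6] at h
                  simp at h
                  subst h
                  simp [pncTrans, h6]
                · rw [show (c == '6') = false by simpa using h6] at h
                  by_cases h7 : c = '7'
                  · rw [show (c == '7') = true by simpa using h7] at h
                    simp at h
                    subst h
                    simp [pncTrans, h7]
                  · rw [show (c == '7') = false by simpa using h7] at h
                    by_cases h8 : c = '8'
                    · rw [show (c == '8') = true by simpa using h8] at h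
                      simp at h
                      subst h
                      simp [pncTrans, h8]
                    · rw [show (c == '8') = false by simpa using h8] at h
                      by_cases h9 : c = '9'
                      · rw [show (c == '9') = true by simpa using h9] at h
                        simp at h
                        subst h
                        simp [pncTrans, h9]
                      · rw [show (c == '9') = false by simpa using h9] at h
                        simp at h

theorem foldl_tr (l : List Char) (acc : List Char) :
    l.foldl (fun acc c =>
      match pncPairs.lookup c with
      | some d => acc ++ [d]
      | none   => acc ++ [c]) acc = acc ++ l.map pncTrans := by
  induction l generalizing acc with
  | nil => simp
  | cons c t ih => rw [List.foldl_cons, lookup_step, ih]; simp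

theorem price_core (t : List Char) :
    (PySem.Chars.join [','] ((PySem.List.pyRange 0 ((t.reverse.length : Nat) : Int) 3).map
        (fun i => PySem.List.slice t.reverse (some i) (some (i + 3))))).reverse
      = PySem.Chars.join [',']
          ((if t.length % 3 = 0 then [] else [t.take (t.length % 3)]) ++
           (PySem.List.pyRange ((t.length % 3 : Nat) : Int) ((t.length : Nat) : Int) 3).map
             (fun i => PySem.List.slice t (some i) (some (i + 3)))) := by
  rw [show (0 : Int) = ((0 : Nat) : Int) from rfl,
      slices_eq_chunk3 t.reverse 0, slices_eq_chunk3 t (t.length % 3), List.drop_zero,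
      rev_join, chunk3_rev t]
  rfl

-- ===== VERDICT (by name: the statement is the Claim_ definition above) =====
theorem persian_numbers_converter_spec : Claim_equal_persian_numbers_converter := by
  intro num mode _
  unfold Spec_persian_numbers_converter persian_numbers_converter persian_numbers_converter_alt
  by_cases hm : mode = "price"
  · subst hm
    cases num with
    | none =>
      simp only [Option.getD_none, if_true, ite_not,
        foldl_tr, List.nil_append, lt_self_iff_false, decide_eq_true_eq, abs_zero]
      exact congrArg String.ofList (price_core _)
    | some n =>
      by_cases hn : n < 0
      · simp only [Option.getD_some, if_true, ite_not,
          foldl_tr, List.nil_append, if_pos hn, decide_eq_true_eq, abs_of_neg hn, neg_one_mul]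
        rw [List.reverse_append, show ([' ','-',' '] : List Char).reverse = [' ','-',' '] from by decide]
        exact congrArg String.ofList (congrArg (· ++ [' ','-',' ']) (price_core _))
      · simp only [Option.getD_some, if_true, ite_not,
          foldl_tr, List.nil_append, if_neg hn, decide_eq_true_eq,
          abs_of_nonneg (Int.not_lt.mp hn), Bool.false_eq_true]
        exact congrArg String.ofList (price_core _)
  · simp only [if_neg hm, if_pos hm, ne_eq, foldl_tr, List.nil_append]
    cases num <;> simp
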